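-- pv_equiv track=rewrite | github.com/d7ftjy8n4j-cell/ai-egfr-platform | fallback_predictor.py | _parse_smiles_simple
-- ===== SOURCE A (Python) =====
-- def _parse_smiles_simple(smiles):
--     """
--     简单解析SMILES字符串，不依赖RDKit
--     """
--     # 基本统计
--     length = len(smiles)
--
--     # 原子计数
--     c_count = smiles.count('C') - smiles.count('Cl')  # 粗略估计
--     n_count = smiles.count('N')
--     o_count = smiles.count('O')
--     s_count = smiles.count('S')
--     f_count = smiles.count('F')
--     cl_count = smiles.count('Cl')
--     br_count = smiles.count('Br')
--
--     # 键计数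
--     double_bonds = smiles.count('=')
--     triple_bonds = smiles.count('#')
--
--     # 分支
--     branch_start = smiles.count('(')
--     branch_end = smiles.count(')')
--
--     # 环
--     rings = sum(1 for c in smiles if c.isdigit())
--
--     # 芳香性（小写c, n, o, s表示芳香原子）
--     aromatic_c = smiles.count('c')
--     aromatic_n = smiles.count('n')
--     aromatic_o = smiles.count('o')
--     aromatic_s = smiles.count('s')
--
--     return {
--         'length': length,
--         'C': max(c_count, 0),
--         'N': n_count,
--         'O': o_count,
--         'S': s_count,
--         'F': f_count,
--         'Cl': cl_count,
--         'Br': br_count,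
--         'double_bonds': double_bonds,
--         'triple_bonds': triple_bonds,
--         'branch_start': branch_start,
--         'branch_end': branch_end,
--         'rings': rings // 2,  # 每个环有两个数字标记
--         'aromatic_c': aromatic_c,
--         'aromatic_n': aromatic_n,
--         'aromatic_o': aromatic_o,
--         'aromatic_s': aromatic_s
--     }
-- ===== SOURCE B (Python) =====
-- def _parse_smiles_simple(smiles):
--     # One linear pass: tally characters in a dict, catching the two-char
--     # tokens 'Cl'/'Br' by looking one position ahead.
--     counts = {}
--     cl = br = rings = 0
--     n = len(smiles)
--     i = 0
--     while i < n:
--         ch = smiles[i]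
--         if ch == 'C' and i + 1 < n and smiles[i + 1] == 'l':
--             cl += 1
--             i += 2
--         elif ch == 'B' and i + 1 < n and smiles[i + 1] == 'r':
--             br += 1
--             i += 2
--         elif ch.isdigit():
--             rings += 1
--             i += 1
--         else:
--             counts[ch] = counts.get(ch, 0) + 1
--             i += 1
--     g = counts.get
--     return {
--         'length': n,
--         'C': g('C', 0),
--         'N': g('N', 0),
--         'O': g('O', 0),
--         'S': g('S', 0),
--         'F': g('F', 0),
--         'Cl': cl,
--         'Br': br,
--         'double_bonds': g('=', 0),
--         'triple_bonds': g('#', 0),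
--         'branch_start': g('(', 0),
--         'branch_end': g(')', 0),
--         'rings': rings // 2,
--         'aromatic_c': g('c', 0),
--         'aromatic_n': g('n', 0),
--         'aromatic_o': g('o', 0),
--         'aromatic_s': g('s', 0),
--     }
-- ===== Notes on version B (the rewrite author's own statement) =====
-- stated objective: alternative
-- what changed: Replaces the fourteen separate substring-count passes of A with a single left-to-right scan that tallies characters in one dict and recognises the two-character chlorine/bromine tokens by one-character lookahead, so carbon is counted directly as the carbons not opening a chlorine token and A's max(...,0) guard disappears.
import Mathlib
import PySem

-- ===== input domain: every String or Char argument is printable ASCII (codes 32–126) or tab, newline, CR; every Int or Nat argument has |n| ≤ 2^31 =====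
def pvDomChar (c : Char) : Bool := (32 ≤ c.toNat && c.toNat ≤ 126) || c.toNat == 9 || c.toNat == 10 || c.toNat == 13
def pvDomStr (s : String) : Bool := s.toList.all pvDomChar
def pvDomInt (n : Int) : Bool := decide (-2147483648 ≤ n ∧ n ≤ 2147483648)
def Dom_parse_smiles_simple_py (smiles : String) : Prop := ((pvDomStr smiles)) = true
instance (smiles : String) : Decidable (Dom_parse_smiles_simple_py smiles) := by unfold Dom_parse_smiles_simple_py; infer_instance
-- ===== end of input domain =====

-- B replaces A's fourteen separate substring-count passes by a single linear scan with a
-- character-count dict and lookahead for the two-char tokens 'Cl'/'Br' (objective: alternative).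


-- ===== PORT A =====
def parse_smiles_simple_py (smiles : String) : List (String × Int) :=
  let length : Int := (PySem.Str.len smiles : Int)
  let c_count : Int := (PySem.Str.count smiles "C" : Int) - (PySem.Str.count smiles "Cl" : Int)
  let n_count : Int := (PySem.Str.count smiles "N" : Int)
  let o_count : Int := (PySem.Str.count smiles "O" : Int)
  let s_count : Int := (PySem.Str.count smiles "S" : Int)
  let f_count : Int := (PySem.Str.count smiles "F" : Int)
  let cl_count : Int := (PySem.Str.count smiles "Cl" : Int)
  let br_count : Int := (PySem.Str.count smiles "Br" : Int)
  let double_bonds : Int := (PySem.Str.count smiles "=" : Int)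
  let triple_bonds : Int := (PySem.Str.count smiles "#" : Int)
  let branch_start : Int := (PySem.Str.count smiles "(" : Int)
  let branch_end : Int := (PySem.Str.count smiles ")" : Int)
  let rings : Int := smiles.toList.foldl (fun acc c => if PySem.Chars.isdigit c then acc + 1 else acc) 0
  let aromatic_c : Int := (PySem.Str.count smiles "c" : Int)
  let aromatic_n : Int := (PySem.Str.count smiles "n" : Int)
  let aromatic_o : Int := (PySem.Str.count smiles "o" : Int)
  let aromatic_s : Int := (PySem.Str.count smiles "s" : Int)
  [("length", length), ("C", max c_count 0), ("N", n_count), ("O", o_count),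
   ("S", s_count), ("F", f_count), ("Cl", cl_count), ("Br", br_count),
   ("double_bonds", double_bonds), ("triple_bonds", triple_bonds),
   ("branch_start", branch_start), ("branch_end", branch_end),
   ("rings", PySem.Int.floordiv rings 2),
   ("aromatic_c", aromatic_c), ("aromatic_n", aromatic_n),
   ("aromatic_o", aromatic_o), ("aromatic_s", aromatic_s)]

-- ===== PORT B =====
-- single pass, state = (counts dict, cl, br, rings); the two-element pattern is Source B's
-- 'i+1 < n' lookahead, the pair branches are its 'i += 2' (for a final lone char the
-- lookahead condition is false, so only the digit test and the tally remain)
def pvScanB : List Char → PySem.Dict Char Int → Int → Int → Int →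
    (PySem.Dict Char Int × Int × Int × Int)
  | [], d, cl, br, r => (d, cl, br, r)
  | [c], d, cl, br, r =>
      if PySem.Chars.isdigit c then (d, cl, br, r + 1)
      else (d.modify c 0 (· + 1), cl, br, r)
  | c1 :: c2 :: t, d, cl, br, r =>
      if c1 = 'C' ∧ c2 = 'l' then pvScanB t d (cl + 1) br r
      else if c1 = 'B' ∧ c2 = 'r' then pvScanB t d cl (br + 1) r
      else if PySem.Chars.isdigit c1 then pvScanB (c2 :: t) d cl br (r + 1)
      else pvScanB (c2 :: t) (d.modify c1 0 (· + 1)) cl br r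

def parse_smiles_simple_py_alt (smiles : String) : List (String × Int) :=
  let st := pvScanB smiles.toList PySem.Dict.empty 0 0 0
  let d := st.1
  let cl := st.2.1
  let br := st.2.2.1
  let rings := st.2.2.2
  let g := fun (c : Char) => d.getD c 0
  [("length", (smiles.toList.length : Int)), ("C", g 'C'), ("N", g 'N'), ("O", g 'O'),
   ("S", g 'S'), ("F", g 'F'), ("Cl", cl), ("Br", br),
   ("double_bonds", g '='), ("triple_bonds", g '#'),
   ("branch_start", g '('), ("branch_end", g ')'),
   ("rings", PySem.Int.floordiv rings 2),
   ("aromatic_c", g 'c'), ("aromatic_n", g 'n'),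
   ("aromatic_o", g 'o'), ("aromatic_s", g 's')]

-- ===== PRECONDITION & SPEC =====
def Spec_parse_smiles_simple_py (smiles : String) (out : List (String × Int)) : Prop := out = parse_smiles_simple_py_alt smiles
instance (smiles : String) (out : List (String × Int)) : Decidable (Spec_parse_smiles_simple_py smiles out) := by unfold Spec_parse_smiles_simple_py; infer_instance

-- ===== CLAIM (what is proved, stated in full; the proofs are below) =====
def Claim_equal_parse_smiles_simple_py : Prop := ∀ (smiles : String), Dom_parse_smiles_simple_py smiles → Spec_parse_smiles_simple_py smiles (parse_smiles_simple_py smiles)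

-- ===== LEMMAS AND PROOFS =====

-- non-overlapping count of the adjacent pair (a,b) in a char list
def pvPair (a b : Char) : List Char → Nat
  | x :: y :: t => if x = a ∧ y = b then pvPair a b t + 1 else pvPair a b (y :: t)
  | _ => 0

theorem pvPair_cons_of_ne (a b x : Char) (l : List Char) (hx : x ≠ a) :
    pvPair a b (x :: l) = pvPair a b l := by
  cases l with
  | nil => rfl
  | cons y t => simp [pvPair, hx]

theorem pvPair_le_count (a b : Char) (l : List Char) :
    pvPair a b l ≤ l.count a := by
  induction l using pvPair.induct a b with
  | case1 x y t hxy ih =>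
      have hxa : (x == a) = true := beq_iff_eq.mpr hxy.1
      simp only [pvPair, if_pos hxy, List.count_cons, hxa, if_true]
      omega
  | case2 x y t hxy ih =>
      simp only [pvPair, if_neg hxy]
      exact le_trans ih ((List.sublist_cons_self x (y :: t)).count_le a)
  | case3 t h =>
      cases t with
      | nil => simp [pvPair]
      | cons x u =>
          cases u with
          | nil => simp [pvPair]
          | cons y v => exact absurd rfl (fun hh => h x y v hh)

theorem count_go_single (c : Char) :
    ∀ (fuel : Nat) (l : List Char) (acc : Nat), l.length ≤ fuel →
      PySem.Chars.count.go [c] fuel l acc = acc + l.count c := by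
  intro fuel
  induction fuel with
  | zero =>
      intro l acc h
      have : l = [] := List.eq_nil_of_length_eq_zero (Nat.le_zero.mp h)
      subst this; rfl
  | succ n ih =>
      intro l acc h
      cases l with
      | nil => rfl
      | cons x t =>
          have hlen : t.length ≤ n := by simpa using h
          simp only [PySem.Chars.count.go]
          split
          · rename_i hp
            have hx : x = c := by
              rcases (List.isPrefixOf_iff_prefix).mp hp with ⟨u, hu⟩
              cases hu; rfl
            subst hx
            rw [show List.drop [x].length (x :: t) = t from rfl, ih t (acc + 1) hlen]
            simp [List.count_cons]
            omega
          · rename_i hp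
            have hx : x ≠ c := by
              rintro rfl
              exact hp (by simp [List.isPrefixOf])
            rw [ih t acc hlen]
            simp [List.count_cons, hx, Ne.symm hx]

theorem count_go_pair (a b : Char) :
    ∀ (fuel : Nat) (l : List Char) (acc : Nat), l.length ≤ fuel →
      PySem.Chars.count.go [a, b] fuel l acc = acc + pvPair a b l := by
  intro fuel
  induction fuel with
  | zero =>
      intro l acc h
      have : l = [] := List.eq_nil_of_length_eq_zero (Nat.le_zero.mp h)
      subst this; rfl
  | succ n ih =>
      intro l acc h
      cases l with
      | nil => rfl
      | cons x t =>
          have hlen : t.length ≤ n := by simpa using h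
          simp only [PySem.Chars.count.go]
          split
          · rename_i hp
            rcases (List.isPrefixOf_iff_prefix).mp hp with ⟨u, hu⟩
            cases t with
            | nil => simp at hu
            | cons y v =>
                injection hu with h1 h2
                injection h2 with h2 h3
                subst h1 h2
                rw [show List.drop [a, b].length (a :: b :: v) = v from rfl,
                  ih v (acc + 1) (by simpa using Nat.le_of_succ_le hlen)]
                rw [show pvPair a b (a :: b :: v) = pvPair a b v + 1 from by
                  simp [pvPair]]
                omega
          · rename_i hp
            rw [ih t acc hlen]
            cases t with
            | nil => rfl
            | cons y v =>
                have hxy : ¬(x = a ∧ y = b) := by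
                  rintro ⟨rfl, rfl⟩
                  exact hp (by simp [List.isPrefixOf])
                simp only [pvPair, if_neg hxy]

theorem count_single (l : List Char) (c : Char) :
    PySem.Chars.count l [c] = l.count c := by
  simpa using count_go_single c l.length l 0 le_rfl

theorem count_pair (l : List Char) (a b : Char) :
    PySem.Chars.count l [a, b] = pvPair a b l := by
  simpa using count_go_pair a b l.length l 0 le_rfl

-- projections of the scan state
theorem scan_cl (l : List Char) (d : PySem.Dict Char Int) (cl br r : Int) :
    (pvScanB l d cl br r).2.1 = cl + (pvPair 'C' 'l' l : Int) := by
  induction l, d, cl, br, r using pvScanB.induct with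
  | case1 d cl br r => simp [pvScanB, pvPair]
  | case2 c d cl br r h => simp [pvScanB, h, pvPair]
  | case3 c d cl br r h => simp [pvScanB, h, pvPair]
  | case4 c1 c2 t d cl br r h ih =>
      obtain ⟨rfl, rfl⟩ := h
      rw [show pvScanB ('C' :: 'l' :: t) d cl br r = pvScanB t d (cl + 1) br r from rfl, ih,
        show pvPair 'C' 'l' ('C' :: 'l' :: t) = pvPair 'C' 'l' t + 1 from rfl]
      push_cast; ring
  | case5 c1 c2 t d cl br r h1 h2 ih =>
      obtain ⟨rfl, rfl⟩ := h2
      rw [show pvScanB ('B' :: 'r' :: t) d cl br r = pvScanB t d cl (br + 1) r from rfl, ih,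
        show pvPair 'C' 'l' ('B' :: 'r' :: t) = pvPair 'C' 'l' ('r' :: t) from rfl,
        pvPair_cons_of_ne _ _ _ _ (by decide)]
  | case6 c1 c2 t d cl br r h1 h2 h3 ih =>
      simp only [pvScanB, if_neg h1, if_neg h2, if_pos h3]
      rw [ih]
      simp only [pvPair, if_neg h1]
  | case7 c1 c2 t d cl br r h1 h2 h3 ih =>
      simp only [pvScanB, if_neg h1, if_neg h2, if_neg h3]
      rw [ih]
      simp only [pvPair, if_neg h1]

theorem scan_br (l : List Char) (d : PySem.Dict Char Int) (cl br r : Int) :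
    (pvScanB l d cl br r).2.2.1 = br + (pvPair 'B' 'r' l : Int) := by
  induction l, d, cl, br, r using pvScanB.induct with
  | case1 d cl br r => simp [pvScanB, pvPair]
  | case2 c d cl br r h => simp [pvScanB, h, pvPair]
  | case3 c d cl br r h => simp [pvScanB, h, pvPair]
  | case4 c1 c2 t d cl br r h ih =>
      obtain ⟨rfl, rfl⟩ := h
      rw [show pvScanB ('C' :: 'l' :: t) d cl br r = pvScanB t d (cl + 1) br r from rfl, ih,
        show pvPair 'B' 'r' ('C' :: 'l' :: t) = pvPair 'B' 'r' ('l' :: t) from rfl,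
        pvPair_cons_of_ne _ _ _ _ (by decide)]
  | case5 c1 c2 t d cl br r h1 h2 ih =>
      obtain ⟨rfl, rfl⟩ := h2
      rw [show pvScanB ('B' :: 'r' :: t) d cl br r = pvScanB t d cl (br + 1) r from rfl, ih,
        show pvPair 'B' 'r' ('B' :: 'r' :: t) = pvPair 'B' 'r' t + 1 from rfl]
      push_cast; ring
  | case6 c1 c2 t d cl br r h1 h2 h3 ih =>
      simp only [pvScanB, if_neg h1, if_neg h2, if_pos h3]
      rw [ih]
      simp only [pvPair, if_neg h2]
  | case7 c1 c2 t d cl br r h1 h2 h3 ih =>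
      simp only [pvScanB, if_neg h1, if_neg h2, if_neg h3]
      rw [ih]
      simp only [pvPair, if_neg h2]

theorem scan_rings (l : List Char) (d : PySem.Dict Char Int) (cl br r : Int) :
    (pvScanB l d cl br r).2.2.2 = r + (l.countP PySem.Chars.isdigit : Int) := by
  induction l, d, cl, br, r using pvScanB.induct with
  | case1 d cl br r => simp [pvScanB]
  | case2 c d cl br r h => simp [pvScanB, h, List.countP_cons]
  | case3 c d cl br r h => simp [pvScanB, h, List.countP_cons]
  | case4 c1 c2 t d cl br r h ih =>
      obtain ⟨rfl, rfl⟩ := h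
      rw [show pvScanB ('C' :: 'l' :: t) d cl br r = pvScanB t d (cl + 1) br r from rfl, ih]
      simp [List.countP_cons, show PySem.Chars.isdigit 'C' = false from rfl,
        show PySem.Chars.isdigit 'l' = false from rfl]
  | case5 c1 c2 t d cl br r h1 h2 ih =>
      obtain ⟨rfl, rfl⟩ := h2
      rw [show pvScanB ('B' :: 'r' :: t) d cl br r = pvScanB t d cl (br + 1) r from rfl, ih]
      simp [List.countP_cons, show PySem.Chars.isdigit 'B' = false from rfl,
        show PySem.Chars.isdigit 'r' = false from rfl]
  | case6 c1 c2 t d cl br r h1 h2 h3 ih =>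
      simp only [pvScanB, if_neg h1, if_neg h2, if_pos h3]
      rw [ih]
      simp [List.countP_cons, h3]
      push_cast; ring
  | case7 c1 c2 t d cl br r h1 h2 h3 ih =>
      simp only [pvScanB, if_neg h1, if_neg h2, if_neg h3]
      rw [ih]
      simp [List.countP_cons, h3]

-- the dict after the scan, at a key that is never part of a pair token and never a digit
theorem scan_getD (c : Char) (hC : c ≠ 'C') (hB : c ≠ 'B') (hl : c ≠ 'l') (hr : c ≠ 'r')
    (hd : PySem.Chars.isdigit c = false) (l : List Char) (d : PySem.Dict Char Int)
    (cl br r : Int) :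
    (pvScanB l d cl br r).1.getD c 0 = d.getD c 0 + (l.count c : Int) := by
  induction l, d, cl, br, r using pvScanB.induct with
  | case1 d cl br r => simp [pvScanB]
  | case2 c' d cl br r h =>
      have hne : c' ≠ c := by rintro rfl; rw [hd] at h; exact absurd h (by simp)
      simp [pvScanB, h, List.count_cons, hne]
  | case3 c' d cl br r h =>
      have hmod := PySem.Dict.getD_foldl_modify_add_one (l := [c']) (d := d) (v := c)
      simp only [List.foldl] at hmod
      simp [pvScanB, h, hmod, List.count_cons]
  | case4 c1 c2 t d cl br r h ih =>
      obtain ⟨rfl, rfl⟩ := h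
      rw [show pvScanB ('C' :: 'l' :: t) d cl br r = pvScanB t d (cl + 1) br r from rfl, ih]
      simp [List.count_cons, hC, hl, Ne.symm hC, Ne.symm hl]
  | case5 c1 c2 t d cl br r h1 h2 ih =>
      obtain ⟨rfl, rfl⟩ := h2
      rw [show pvScanB ('B' :: 'r' :: t) d cl br r = pvScanB t d cl (br + 1) r from rfl, ih]
      simp [List.count_cons, hB, hr, Ne.symm hB, Ne.symm hr]
  | case6 c1 c2 t d cl br r h1 h2 h3 ih =>
      have hne : c1 ≠ c := by rintro rfl; rw [hd] at h3; exact absurd h3 (by simp)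
      simp only [pvScanB, if_neg h1, if_neg h2, if_pos h3]
      rw [ih]
      simp [List.count_cons, hne, Ne.symm hne]
  | case7 c1 c2 t d cl br r h1 h2 h3 ih =>
      simp only [pvScanB, if_neg h1, if_neg h2, if_neg h3]
      rw [ih]
      have hmod := PySem.Dict.getD_foldl_modify_add_one (l := [c1]) (d := d) (v := c)
      simp only [List.foldl] at hmod
      rw [hmod]
      simp [List.count_cons]
      ring

-- the dict after the scan, at 'C': the 'C's not opening a 'Cl' token
theorem scan_getD_C (l : List Char) (d : PySem.Dict Char Int) (cl br r : Int) :
    (pvScanB l d cl br r).1.getD 'C' 0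
      = d.getD 'C' 0 + (l.count 'C' : Int) - (pvPair 'C' 'l' l : Int) := by
  induction l, d, cl, br, r using pvScanB.induct with
  | case1 d cl br r => simp [pvScanB, pvPair]
  | case2 c' d cl br r h =>
      have hne : c' ≠ 'C' := by rintro rfl; exact absurd h (by decide)
      simp [pvScanB, h, List.count_cons, hne, pvPair]
  | case3 c' d cl br r h =>
      have hmod := PySem.Dict.getD_foldl_modify_add_one (l := [c']) (d := d) (v := 'C')
      simp only [List.foldl] at hmod
      simp [pvScanB, h, hmod, List.count_cons, pvPair]
  | case4 c1 c2 t d cl br r h ih =>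
      obtain ⟨rfl, rfl⟩ := h
      rw [show pvScanB ('C' :: 'l' :: t) d cl br r = pvScanB t d (cl + 1) br r from rfl, ih,
        show pvPair 'C' 'l' ('C' :: 'l' :: t) = pvPair 'C' 'l' t + 1 from rfl]
      simp [List.count_cons]
      push_cast; ring
  | case5 c1 c2 t d cl br r h1 h2 ih =>
      obtain ⟨rfl, rfl⟩ := h2
      rw [show pvScanB ('B' :: 'r' :: t) d cl br r = pvScanB t d cl (br + 1) r from rfl, ih,
        show pvPair 'C' 'l' ('B' :: 'r' :: t) = pvPair 'C' 'l' ('r' :: t) from rfl,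
        pvPair_cons_of_ne _ _ _ _ (by decide)]
      simp [List.count_cons]
  | case6 c1 c2 t d cl br r h1 h2 h3 ih =>
      have hne : c1 ≠ 'C' := by rintro rfl; exact absurd h3 (by decide)
      simp only [pvScanB, if_neg h1, if_neg h2, if_pos h3]
      rw [ih]
      simp only [pvPair, if_neg h1, List.count_cons]
      simp [hne]
  | case7 c1 c2 t d cl br r h1 h2 h3 ih =>
      simp only [pvScanB, if_neg h1, if_neg h2, if_neg h3]
      rw [ih]
      have hmod := PySem.Dict.getD_foldl_modify_add_one (l := [c1]) (d := d) (v := 'C')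
      simp only [List.foldl] at hmod
      rw [hmod]
      simp only [pvPair, if_neg h1, List.count_cons]
      simp
      push_cast; ring

-- ===== VERDICT (by name: the statement is the Claim_ definition above) =====
theorem parse_smiles_simple_py_spec : Claim_equal_parse_smiles_simple_py := by
  intro s _
  show parse_smiles_simple_py s = parse_smiles_simple_py_alt s
  have hle : (pvPair 'C' 'l' s.toList : Int) ≤ (s.toList.count 'C' : Int) := by
    exact_mod_cast pvPair_le_count 'C' 'l' s.toList
  unfold parse_smiles_simple_py parse_smiles_simple_py_alt
  simp only [PySem.Str.count, PySem.Str.len, PySem.Chars.len,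
    show ("C" : String).toList = ['C'] from rfl,
    show ("Cl" : String).toList = ['C', 'l'] from rfl,
    show ("N" : String).toList = ['N'] from rfl,
    show ("O" : String).toList = ['O'] from rfl,
    show ("S" : String).toList = ['S'] from rfl,
    show ("F" : String).toList = ['F'] from rfl,
    show ("Br" : String).toList = ['B', 'r'] from rfl,
    show ("=" : String).toList = ['='] from rfl,
    show ("#" : String).toList = ['#'] from rfl,
    show ("(" : String).toList = ['('] from rfl,
    show (")" : String).toList = [')'] from rfl,
    show ("c" : String).toList = ['c'] from rfl,
    show ("n" : String).toList = ['n'] from rfl,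
    show ("o" : String).toList = ['o'] from rfl,
    show ("s" : String).toList = ['s'] from rfl,
    count_single, count_pair,
    scan_cl, scan_br, scan_rings, scan_getD_C,
    scan_getD 'N' (by decide) (by decide) (by decide) (by decide) (by decide),
    scan_getD 'O' (by decide) (by decide) (by decide) (by decide) (by decide),
    scan_getD 'S' (by decide) (by decide) (by decide) (by decide) (by decide),
    scan_getD 'F' (by decide) (by decide) (by decide) (by decide) (by decide),
    scan_getD '=' (by decide) (by decide) (by decide) (by decide) (by decide),
    scan_getD '#' (by decide) (by decide) (by decide) (by decide) (by decide),
    scan_getD '(' (by decide) (by decide) (by decide) (by decide) (by decide),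
    scan_getD ')' (by decide) (by decide) (by decide) (by decide) (by decide),
    scan_getD 'c' (by decide) (by decide) (by decide) (by decide) (by decide),
    scan_getD 'n' (by decide) (by decide) (by decide) (by decide) (by decide),
    scan_getD 'o' (by decide) (by decide) (by decide) (by decide) (by decide),
    scan_getD 's' (by decide) (by decide) (by decide) (by decide) (by decide),
    PySem.List.foldl_if_add_one, PySem.Dict.getD_empty, zero_add]
  rw [max_eq_left (by omega)]
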